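-- pv_equiv track=rewrite | github.com/MrBrantCode/unitest_baseline | mut_generate/mist_train_cf/cf_87012/solution.py | convert_to_reverse_prime_number
-- ===== SOURCE A (Python) =====
-- def convert_to_reverse_prime_number(arr):
--     result = ""
--
--     # Iterate through the input array in reverse order
--     for num in reversed(arr):
--         # Check if the number is prime
--         is_prime = True
--         if num > 1:
--             for i in range(2, int(num/2) + 1):
--                 if (num % i) == 0:
--                     is_prime = False
--                     break
--
--         # If the number is prime, convert it to a string and append it to the result string
--         if is_prime:
--             result += str(num)
--
--     return result
-- ===== SOURCE B (Python) =====
-- def convert_to_reverse_prime_number(arr):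
--     # Same selection rule as the original (numbers <= 1 pass the "prime" test
--     # vacuously, as in A), but trial division only by 2 and odd i up to sqrt(n).
--     def keep(n):
--         if n < 4:
--             return True
--         if n % 2 == 0:
--             return False
--         i = 3
--         while i * i <= n:
--             if n % i == 0:
--                 return False
--             i += 2
--         return True
--     return "".join(str(n) for n in reversed(arr) if keep(n))
-- ===== Notes on version B (the rewrite author's own statement) =====
-- stated objective: faster
-- what changed: Trial division only by 2 and odd divisors up to sqrt(n) (instead of every i up to n/2), and the result string is built with ''.join over a filtered reversed generator instead of repeated += concatenation.
import Mathlib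
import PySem

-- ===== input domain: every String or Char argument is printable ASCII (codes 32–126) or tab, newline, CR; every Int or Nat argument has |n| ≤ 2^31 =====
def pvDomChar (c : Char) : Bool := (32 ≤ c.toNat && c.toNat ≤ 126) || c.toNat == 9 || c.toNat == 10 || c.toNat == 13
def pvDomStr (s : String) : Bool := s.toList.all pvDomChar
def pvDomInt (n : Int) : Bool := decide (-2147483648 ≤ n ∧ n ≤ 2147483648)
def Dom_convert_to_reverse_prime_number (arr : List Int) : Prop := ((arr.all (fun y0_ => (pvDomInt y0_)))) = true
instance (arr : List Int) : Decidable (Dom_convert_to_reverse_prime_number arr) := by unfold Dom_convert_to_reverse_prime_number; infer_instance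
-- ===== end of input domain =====

-- B replaces A's trial division by every i up to num/2 with trial division by 2 and
-- odd i up to sqrt(num), and builds the string by join instead of repeated += (faster).

-- ===== PORT A =====
def convert_to_reverse_prime_number (arr : List Int) : String :=
  arr.reverse.foldl (fun result num =>
    let is_prime : Bool :=
      if num > 1 then
        -- int(num/2): exact float division for |num| ≤ 2^31, then truncation = Int.tdiv
        (PySem.List.pyRange 2 (PySem.Int.truncdiv num 2 + 1) 1).all
          (fun i => !(PySem.Int.mod num i == 0))
      else true
    if is_prime then result ++ PySem.Int.toStr num else result) ""

-- ===== PORT B =====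
-- while i * i <= n: if n % i == 0: return False; i += 2
def pvSqrtLoop (n i : Int) : Bool :=
  if _h : i * i ≤ n then
    if PySem.Int.mod n i == 0 then false else pvSqrtLoop n (i + 2)
  else true
termination_by (n + 1 - i).toNat
decreasing_by
  by_cases hi : i ≤ 0
  · have : (0:Int) ≤ i * i := mul_self_nonneg i
    omega
  · have : i ≤ i * i := le_mul_of_one_le_left (by omega) (by omega)
    omega

def pvKeep (n : Int) : Bool :=
  if n < 4 then true
  else if PySem.Int.mod n 2 == 0 then false
  else pvSqrtLoop n 3

def convert_to_reverse_prime_number_alt (arr : List Int) : String :=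
  PySem.Str.join "" ((arr.reverse.filter pvKeep).map PySem.Int.toStr)

-- ===== PRECONDITION & SPEC =====
def Spec_convert_to_reverse_prime_number (arr : List Int) (out : String) : Prop := out = convert_to_reverse_prime_number_alt arr
instance (arr : List Int) (out : String) : Decidable (Spec_convert_to_reverse_prime_number arr out) := by unfold Spec_convert_to_reverse_prime_number; infer_instance

-- ===== CLAIM (what is proved, stated in full; the proofs are below) =====
def Claim_equal_convert_to_reverse_prime_number : Prop := ∀ (arr : List Int), Dom_convert_to_reverse_prime_number arr → Spec_convert_to_reverse_prime_number arr (convert_to_reverse_prime_number arr)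

-- ===== LEMMAS AND PROOFS =====

lemma pvSqrtLoop_iff (n : Int) : ∀ i : Int, 3 ≤ i →
    (pvSqrtLoop n i = true ↔ ∀ j : Int, i ≤ j → 2 ∣ (j - i) → j * j ≤ n → ¬ j ∣ n) := by
  intro i
  induction i using pvSqrtLoop.induct (n := n) with
  | case1 x hx hmod =>
    intro _
    rw [pvSqrtLoop]
    simp only [hx, dif_pos, hmod, if_pos]
    constructor
    · intro h; exact absurd h (by simp)
    · intro h
      exact absurd (h x le_rfl ⟨0, by ring⟩ hx)
        (by simpa [PySem.Int.mod_eq_zero_iff_dvd] using hmod)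
  | case2 x hx hmod ih =>
    intro hx3
    rw [pvSqrtLoop]
    rw [dif_pos hx, if_neg hmod]
    rw [ih (by omega)]
    constructor
    · intro h j hj hdvd hsq hjn
      by_cases hje : j = x
      · subst hje
        exact absurd ((PySem.Int.mod_eq_zero_iff_dvd n j).mpr hjn) (by simpa using hmod)
      · exact h j (by omega) (by omega) hsq hjn
    · intro h j hj hdvd hsq
      exact h j (by omega) (by omega) hsq
  | case3 x hx =>
    intro hx3
    rw [pvSqrtLoop]
    simp only [hx, dif_neg, not_false_iff, true_iff]
    intro j hj _ hsq
    exfalso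
    have : x * x ≤ j * j := mul_le_mul hj hj (by omega) (by omega)
    omega

lemma pvRangeAll_iff (n : Int) :
    ((PySem.List.pyRange 2 (PySem.Int.truncdiv n 2 + 1) 1).all
        (fun i => !(PySem.Int.mod n i == 0)) = true)
      ↔ ∀ i : Int, 2 ≤ i → i ≤ PySem.Int.truncdiv n 2 → ¬ i ∣ n := by
  simp only [List.all_eq_true, PySem.List.mem_pyRange_one, Bool.not_eq_eq_eq_not,
    Bool.not_true, beq_eq_false_iff_ne, ne_eq]
  constructor
  · intro h i h2 hle
    rw [← PySem.Int.mod_eq_zero_iff_dvd]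
    exact h i ⟨h2, by omega⟩
  · intro h i ⟨h2, hlt⟩
    rw [PySem.Int.mod_eq_zero_iff_dvd]
    exact h i h2 (by omega)

lemma pvKeep_eq (num : Int) :
    (if num > 1 then
        (PySem.List.pyRange 2 (PySem.Int.truncdiv num 2 + 1) 1).all
          (fun i => !(PySem.Int.mod num i == 0))
      else true) = pvKeep num := by
  by_cases h1 : num ≤ 1
  · rw [if_neg (by omega), pvKeep, if_pos (by omega)]
  -- now num ≥ 2
  by_cases h4 : num < 4
  · -- num = 2 or 3
    interval_cases num <;> decide
  -- num ≥ 4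
  have htd : PySem.Int.truncdiv num 2 = num / 2 := Int.tdiv_eq_ediv_of_nonneg (by omega)
  rw [if_pos (by omega)]
  by_cases hev : (2:Int) ∣ num
  · -- even ≥ 4: both false
    have hA : ¬ ((PySem.List.pyRange 2 (PySem.Int.truncdiv num 2 + 1) 1).all
        (fun i => !(PySem.Int.mod num i == 0)) = true) := by
      rw [pvRangeAll_iff]
      push Not
      exact ⟨2, by omega, by rw [htd]; omega, hev⟩
    have hB : pvKeep num = false := by
      rw [pvKeep, if_neg (by omega), if_pos]
      simpa [PySem.Int.mod_eq_zero_iff_dvd] using hev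
    simp [hB, Bool.eq_false_iff] at hA ⊢
    exact hA
  · -- odd ≥ 5
    have hB : pvKeep num = pvSqrtLoop num 3 := by
      rw [pvKeep, if_neg (by omega), if_neg (by simpa [PySem.Int.mod_eq_zero_iff_dvd] using hev)]
    rw [hB, Bool.eq_iff_iff, pvRangeAll_iff, pvSqrtLoop_iff num 3 (by omega), htd]
    constructor
    · -- A-side no divisor → loop no divisor
      intro h j hj3 _ hsq
      have h3j : 3 * j ≤ j * j := mul_le_mul_of_nonneg_right hj3 (by omega)
      exact h j (by omega) (by omega)
    · intro h i h2 hle hdvd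
      have hiodd : ¬ (2:Int) ∣ i := fun hd => hev (hd.trans hdvd)
      have hi3 : 3 ≤ i := by omega
      obtain ⟨c, hc⟩ := id hdvd
      have hipos : (0:Int) < i := by omega
      have h2i : 2 * i ≤ num := by omega
      have hc2 : 2 ≤ c := by
        by_contra hcon
        have : i * c ≤ i * 1 := mul_le_mul_of_nonneg_left (by omega) (by omega)
        rw [mul_one] at this
        omega
      have hcodd : ¬ (2:Int) ∣ c := fun ⟨k, hk⟩ => hev ⟨i * k, by rw [hc, hk]; ring⟩
      have hc3 : 3 ≤ c := by omega
      have hcdvd : c ∣ num := ⟨i, by rw [hc]; ring⟩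
      by_cases hic : i ≤ c
      · exact h i hi3 (by omega) (by nlinarith) hdvd
      · exact h c hc3 (by omega) (by nlinarith) hcdvd

lemma pvJoin_cons (a : String) (l : List String) :
    PySem.Str.join "" (a :: l) = a ++ PySem.Str.join "" l := by
  apply String.toList_inj.mp
  rw [String.toList_append, PySem.Str.toList_join, PySem.Str.toList_join]
  show PySem.Chars.join "".toList (a.toList :: l.map String.toList)
      = a.toList ++ PySem.Chars.join "".toList (l.map String.toList)
  have : "".toList = ([] : List Char) := rfl
  rw [this]
  cases l <;> simp [PySem.Chars.join, List.intercalate]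

lemma pvFold_join (l : List Int) (s : String) :
    l.foldl (fun result num => if pvKeep num then result ++ PySem.Int.toStr num else result) s
      = s ++ PySem.Str.join "" ((l.filter pvKeep).map PySem.Int.toStr) := by
  induction l generalizing s with
  | nil =>
    simp [PySem.Str.join, PySem.Chars.join, List.intercalate]
  | cons a l ih =>
    by_cases ha : pvKeep a
    · simp only [List.foldl_cons, if_pos ha, List.filter_cons_of_pos ha, List.map_cons,
        pvJoin_cons, ih, String.append_assoc]
    · simp only [List.foldl_cons, if_neg ha, List.filter_cons_of_neg ha, ih]

-- ===== VERDICT (by name: the statement is the Claim_ definition above) =====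
theorem convert_to_reverse_prime_number_spec : Claim_equal_convert_to_reverse_prime_number := by
  intro arr _
  unfold Spec_convert_to_reverse_prime_number convert_to_reverse_prime_number convert_to_reverse_prime_number_alt
  have hfun : (fun (result : String) (num : Int) =>
      let is_prime : Bool :=
        if num > 1 then
          (PySem.List.pyRange 2 (PySem.Int.truncdiv num 2 + 1) 1).all
            (fun i => !(PySem.Int.mod num i == 0))
        else true
      if is_prime then result ++ PySem.Int.toStr num else result)
      = (fun (result : String) (num : Int) =>
          if pvKeep num then result ++ PySem.Int.toStr num else result) := by
    funext result num
    simp only [pvKeep_eq num]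
  rw [hfun, pvFold_join]
  simp
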